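-- pv_equiv track=rewrite | github.com/anoop675/Control-Law-Diagram-Detection-AI-Software | dag_construction_and_c_code_generation_module_latest3.py | create_logical_paths
-- ===== SOURCE A (Python) =====
-- from collections import defaultdict, deque
--
-- def create_logical_paths(lines):
--     graph = defaultdict(list)
--
--     # Build graph from line segments
--     for path in lines:
--         start = path[0]
--         end = path[-1]
--         graph[start].append((end, path))
--
--     merged_paths = []
--     visited = set()
--
--     # Depth First Search to merge paths
--     def dfs(node, current_path):
--         if node in visited:
--             return
--         visited.add(node)
--         current_path.append(node)
--
--         if node in graph:
--             for neighbor, subpath in graph[node]: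
--                 # Avoid duplicates
--                 if subpath[1:] not in current_path:
--                     dfs(neighbor, current_path + subpath[1:])
--         else:
--             merged_paths.append(current_path)
--
--     # Traverse graph and merge paths
--     for start, edges in graph.items():
--         if start not in visited:
--             for neighbor, path in edges:
--                 dfs(neighbor, path[:])
--
--     # Remove duplicate points and overlapping segments
--     final_paths = []
--     for path in merged_paths:
--         clean_path = [path[0]]
--         for i in range(1, len(path)):
--             if path[i] != path[i-1]:
--                 clean_path.append(path[i])
--         final_paths.append(clean_path)
--
--     return final_paths
-- ===== SOURCE B (Python) =====
-- from collections import defaultdict, deque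
--
-- def create_logical_paths(lines):
--     graph = defaultdict(list)
--
--     # Build graph from line segments (identical to the original)
--     for path in lines:
--         graph[path[0]].append((path[-1], path))
--
--     merged_paths = []
--     visited = set()
--
--     # Iterative explicit-stack worklist replacing the recursive dfs:
--     # pop a task, push its children in reversed order so sibling order is preserved
--     for start, edges in graph.items():
--         if start not in visited:
--             for neighbor, path in edges:
--                 stack = [(neighbor, path[:])]
--                 while stack:
--                     node, cur = stack.pop()
--                     if node in visited:
--                         continue
--                     visited.add(node)
--                     cur = cur + [node]
--                     if node in graph:
--                         for nb, sub in reversed(graph[node]):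
--                             if sub[1:] not in cur:
--                                 stack.append((nb, cur + sub[1:]))
--                     else:
--                         merged_paths.append(cur)
--
--     # Remove duplicate points and overlapping segments (unchanged)
--     final_paths = []
--     for path in merged_paths:
--         clean_path = [path[0]]
--         for i in range(1, len(path)):
--             if path[i] != path[i-1]:
--                 clean_path.append(path[i])
--         final_paths.append(clean_path)
--
--     return final_paths
-- ===== Notes on version B (the rewrite author's own statement) =====
-- stated objective: alternative
-- what changed: The recursive inner dfs is replaced by an explicit stack worklist that pops (node, path) tasks and pushes children in reversed order, preserving the exact traversal and output order; graph building and the cleanup loop are unchanged.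
import Mathlib
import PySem

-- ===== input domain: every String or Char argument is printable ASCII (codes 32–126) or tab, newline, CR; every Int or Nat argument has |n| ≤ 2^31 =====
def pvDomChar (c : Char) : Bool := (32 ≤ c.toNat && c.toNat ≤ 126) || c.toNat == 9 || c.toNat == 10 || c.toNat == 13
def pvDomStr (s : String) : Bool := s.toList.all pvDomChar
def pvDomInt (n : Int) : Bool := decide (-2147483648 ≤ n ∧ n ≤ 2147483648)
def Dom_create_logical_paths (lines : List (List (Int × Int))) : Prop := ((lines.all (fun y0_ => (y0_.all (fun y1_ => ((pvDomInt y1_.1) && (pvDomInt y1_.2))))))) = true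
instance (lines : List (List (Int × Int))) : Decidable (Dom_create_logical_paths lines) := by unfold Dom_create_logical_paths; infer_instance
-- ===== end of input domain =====

-- B replaces the recursive inner dfs by an explicit stack worklist (children pushed in
-- reversed order so sibling order is preserved); graph building and cleanup are unchanged.
-- Objective: alternative decomposition (iterative worklist instead of recursion), same cost.

abbrev pvNode : Type := Int × Int
abbrev pvGraph : Type := PySem.Dict pvNode (List (pvNode × List pvNode))
abbrev pvSt : Type := PySem.Set pvNode × List (List pvNode)

-- ===== PORT A =====
-- graph building loop, shared verbatim by both Pythons:
-- for path in lines: graph[path[0]].append((path[-1], path))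
def pvBuildGraph (lines : List (List pvNode)) : pvGraph :=
  lines.foldl (fun g path =>
    match PySem.List.pyGet? path 0, PySem.List.pyGet? path (-1) with
    | some s, some e => g.modify s [] (fun v => v ++ [(e, path)])
    | _, _ => g   -- unreachable under Pre_: Python raises IndexError on an empty segment
  ) PySem.Dict.empty

-- the final dedup-cleanup loop, shared verbatim by both Pythons:
-- clean_path = [path[0]]; for i in range(1, len(path)): if path[i] != path[i-1]: append
-- (merged paths are never empty, so the default of pyGetD is a totality guard only)
def pvClean (path : List pvNode) : List pvNode :=
  (PySem.List.pyRange 1 (PySem.List.len path) 1).foldl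
    (fun acc i =>
      if PySem.List.pyGetD path i (0, 0) ≠ PySem.List.pyGetD path (i - 1) (0, 0) then
        acc ++ [PySem.List.pyGetD path i (0, 0)]
      else acc)
    [PySem.List.pyGetD path 0 (0, 0)]

-- A's recursive dfs. The fuel parameter (depth budget) is a totality guard only: the depth
-- of the recursion is bounded by the number of distinct end-nodes, so with the top-level
-- fuel lines.length + 1 a fuel-0 call can only occur where the visited check returns anyway.
-- Python's guard `subpath[1:] not in current_path` compares a LIST with the point elements
-- of current_path, hence is always True; it is kept as the unconditional branch (same in B).
def pvDfsA (g : pvGraph) : Nat → pvSt → pvNode → List pvNode → pvSt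
  | 0, st, _, _ => st
  | f + 1, st, node, path =>
    if PySem.Set.contains st.1 node then st
    else
      let st1 : pvSt := (PySem.Set.add st.1 node, st.2)
      let cur := path ++ [node]
      match g.get? node with
      | some edges => edges.foldl (fun s e => pvDfsA g f s e.1 (cur ++ e.2.drop 1)) st1
      | none => (st1.1, st1.2 ++ [cur])

def create_logical_paths (lines : List (List (Int × Int))) : List (List (Int × Int)) :=
  let g := pvBuildGraph lines
  let st : pvSt :=
    g.items.foldl (fun st kv =>
      if PySem.Set.contains st.1 kv.1 then st
      else kv.2.foldl (fun s e => pvDfsA g (lines.length + 1) s e.1 e.2) st)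
      (PySem.Set.empty, [])
  st.2.map pvClean

-- ===== PORT B =====
-- bound used only by the termination measure of the worklist loop
def pvEdgeBound (g : pvGraph) : Nat := (g.values.map List.length).sum

theorem pvEdgeBound_le {g : pvGraph} {n : pvNode} {edges : List (pvNode × List pvNode)}
    (h : g.get? n = some edges) : edges.length ≤ pvEdgeBound g := by
  have hmem : (n, edges) ∈ g.items := PySem.Dict.mem_items_of_get?_eq_some g h
  have hv : edges ∈ g.values := by
    simp only [PySem.Dict.values]
    exact List.mem_map.mpr ⟨(n, edges), hmem, rfl⟩
  exact List.single_le_sum (fun x _ => Nat.zero_le x) _ (List.mem_map.mpr ⟨edges, hv, rfl⟩)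

def pvWeight (E : Nat) (stack : List (Nat × pvNode × List pvNode)) : Nat :=
  (stack.map (fun t => (E + 1) ^ (t.1 + 1))).sum

-- B's stack worklist: Source B pushes the children in reversed order and pops from the end,
-- i.e. the children are prepended, in order, to the front of the stack. Each entry carries
-- the same depth-budget fuel as the corresponding dfs call in A (a totality guard only;
-- see the comment on pvDfsA). The always-True `sub[1:] not in cur` guard is kept as the
-- unconditional push, exactly as in pvDfsA.
def pvRunB (g : pvGraph) (stack : List (Nat × pvNode × List pvNode)) (st : pvSt) : pvSt :=
  match stack with
  | [] => st
  | (f, node, cur) :: rest =>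
    match f with
    | 0 => pvRunB g rest st
    | f' + 1 =>
      if PySem.Set.contains st.1 node then pvRunB g rest st
      else
        let st1 : pvSt := (PySem.Set.add st.1 node, st.2)
        let cur' := cur ++ [node]
        match h : g.get? node with
        | some edges =>
            -- h is used by the decreasing_by proof below
            pvRunB g ((edges.map (fun e => (f', e.1, cur' ++ e.2.drop 1))) ++ rest) st1
        | none => pvRunB g rest (st1.1, st1.2 ++ [cur'])
  termination_by pvWeight (pvEdgeBound g) stack
  decreasing_by
  · simp only [pvWeight, List.map_cons, List.sum_cons]
    have : 0 < (pvEdgeBound g + 1) ^ (0 + 1) := pow_pos (Nat.succ_pos _) _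
    omega
  · simp only [pvWeight, List.map_cons, List.sum_cons, Nat.succ_eq_add_one]
    have : 0 < (pvEdgeBound g + 1) ^ (f' + 1 + 1) := pow_pos (Nat.succ_pos _) _
    omega
  · simp only [pvWeight, List.map_append, List.sum_append, List.map_map, List.map_cons,
      List.sum_cons, Function.comp_def, Nat.succ_eq_add_one]
    have hlen : edges.length ≤ pvEdgeBound g := pvEdgeBound_le h
    have hX : 0 < (pvEdgeBound g + 1) ^ (f' + 1) := pow_pos (Nat.succ_pos _) _
    have hsum : (edges.map (fun _ => (pvEdgeBound g + 1) ^ (f' + 1))).sum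
        = edges.length * (pvEdgeBound g + 1) ^ (f' + 1) := by
      simp [List.map_const']
    have hlt : edges.length * (pvEdgeBound g + 1) ^ (f' + 1)
        < (pvEdgeBound g + 1) ^ (f' + 1 + 1) := by
      rw [pow_succ]
      calc edges.length * (pvEdgeBound g + 1) ^ (f' + 1)
          ≤ pvEdgeBound g * (pvEdgeBound g + 1) ^ (f' + 1) := Nat.mul_le_mul_right _ hlen
        _ < (pvEdgeBound g + 1) ^ (f' + 1) * (pvEdgeBound g + 1) := by nlinarith
    rw [hsum]
    omega
  · simp only [pvWeight, List.map_cons, List.sum_cons, Nat.succ_eq_add_one]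
    have : 0 < (pvEdgeBound g + 1) ^ (f' + 1 + 1) := pow_pos (Nat.succ_pos _) _
    omega

def create_logical_paths_alt (lines : List (List (Int × Int))) : List (List (Int × Int)) :=
  let g := pvBuildGraph lines
  let st : pvSt :=
    g.items.foldl (fun st kv =>
      if PySem.Set.contains st.1 kv.1 then st
      else kv.2.foldl (fun s e => pvRunB g [(lines.length + 1, e.1, e.2)] s) st)
      (PySem.Set.empty, [])
  st.2.map pvClean

-- ===== PRECONDITION & SPEC =====
-- Pre_ excludes inputs containing an empty segment: Python A raises IndexError on path[0] there.
def Pre_create_logical_paths (lines : List (List (Int × Int))) : Prop :=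
  ∀ p ∈ lines, p ≠ []
instance (lines : List (List (Int × Int))) : Decidable (Pre_create_logical_paths lines) := by
  unfold Pre_create_logical_paths; infer_instance

def pvWitness_create_logical_paths : (List (List (Int × Int))) :=
  [[(0, 0), (1, 1)], [(1, 1), (2, 2)]]

def Spec_create_logical_paths (lines : List (List (Int × Int))) (out : List (List (Int × Int))) : Prop := out = create_logical_paths_alt lines
instance (lines : List (List (Int × Int))) (out : List (List (Int × Int))) : Decidable (Spec_create_logical_paths lines out) := by unfold Spec_create_logical_paths; infer_instance

-- ===== CLAIM (what is proved, stated in full; the proofs are below) =====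
def Claim_equal_create_logical_paths : Prop := ∀ (lines : List (List (Int × Int))), Dom_create_logical_paths lines → Pre_create_logical_paths lines → Spec_create_logical_paths lines (create_logical_paths lines)

-- ===== LEMMAS AND PROOFS =====

theorem pvRunB_nil (g : pvGraph) (st : pvSt) : pvRunB g [] st = st := by
  rw [pvRunB]

-- one pop of the worklist performs exactly one dfs call (strong induction on the fuel)
theorem pvBridge (g : pvGraph) :
    ∀ (f : Nat) (node : pvNode) (path : List pvNode)
      (rest : List (Nat × pvNode × List pvNode)) (st : pvSt),
      pvRunB g ((f, node, path) :: rest) st = pvRunB g rest (pvDfsA g f st node path) := by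
  intro f
  induction f using Nat.strong_induction_on with
  | _ f IH =>
    intro node path rest st
    match f with
    | 0 => rw [pvRunB, pvDfsA]
    | f' + 1 =>
      by_cases hv : PySem.Set.contains st.1 node
      · rw [pvRunB, pvDfsA]
        simp only [hv, if_true]
      · have Mx : ∀ (hfun : pvNode × List pvNode → List pvNode)
            (edges : List (pvNode × List pvNode))
            (rest : List (Nat × pvNode × List pvNode)) (st : pvSt),
            pvRunB g (edges.map (fun e => (f', e.1, hfun e)) ++ rest) st
              = pvRunB g rest (edges.foldl (fun s e => pvDfsA g f' s e.1 (hfun e)) st) := by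
          intro hfun edges
          induction edges with
          | nil => intro rest st; simp
          | cons e es ih =>
            intro rest st
            simp only [List.map_cons, List.cons_append, List.foldl_cons]
            rw [IH f' (Nat.lt_succ_self _), ih]
        rw [pvRunB, pvDfsA]
        simp only [hv, if_false, Bool.false_eq_true]
        cases hg : g.get? node with
        | some edges => exact Mx _ edges rest _
        | none => rfl

-- ===== VERDICT (by name: the statement is the Claim_ definition above) =====
theorem create_logical_paths_spec : Claim_equal_create_logical_paths := by
  intro lines _ _
  unfold Spec_create_logical_paths create_logical_paths create_logical_paths_alt
  have h : ∀ (g : pvGraph) (f : Nat) (s : pvSt) (e : pvNode × List pvNode),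
      pvRunB g [(f, e.1, e.2)] s = pvDfsA g f s e.1 e.2 := by
    intro g f s e
    rw [pvBridge, pvRunB_nil]
  simp only [h]
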